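-- pv_equiv track=rewrite | github.com/suhasgumma/Problem-Solving | codeForces/Round689Div2/BFindTheSpruceSuccess.py | solve
-- ===== SOURCE A (Python) =====
-- def solve(mat, n, m):
--     res = 0
--
--     dp = [[1 for _ in range(m)] for _ in range(n)]
--
--     for i in range(n):
--         for j in range(m):
--             if mat[i][j] == '.': dp[i][j] = 0
--
--
--     for i in range(n-2, -1, -1):
--         for j in range(1, m-1):
--
--             if dp[i][j] == 0: continue
--
--             minh = min(dp[i+1][j-1], dp[i+1][j], dp[i+1][j+1])
--
--             dp[i][j] = 1+ minh
--
--
--     for i in range(n):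
--         for j in range(m):
--             res+= dp[i][j]
--
--
--
--     return res
-- ===== SOURCE B (Python) =====
-- def solve(mat, n, m):
--     # Per-row prefix sums of tree cells, then expand each root downward,
--     # checking each full row of the spruce in O(1) via the prefix table.
--     pref = []
--     for i in range(n):
--         row = [0]
--         s = 0
--         for j in range(m):
--             s += 0 if mat[i][j] == '.' else 1
--             row.append(s)
--         pref.append(row)
--     res = 0
--     for i in range(n):
--         for j in range(m):
--             if mat[i][j] == '.':
--                 continue
--             k = 1
--             while (i + k < n and k <= j and j + k < m
--                    and pref[i + k][j + k + 1] - pref[i + k][j - k] == 2 * k + 1):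
--                 k += 1
--             res += k
--     return res
-- ===== Notes on version B (the rewrite author's own statement) =====
-- stated objective: alternative
-- what changed: Replaces A's bottom-up min-of-three dynamic program over a mutated dp grid by a per-row prefix-sum table of tree cells plus a direct expand-and-count at each root, verifying each spruce level with an O(1) window check.
import Mathlib
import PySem

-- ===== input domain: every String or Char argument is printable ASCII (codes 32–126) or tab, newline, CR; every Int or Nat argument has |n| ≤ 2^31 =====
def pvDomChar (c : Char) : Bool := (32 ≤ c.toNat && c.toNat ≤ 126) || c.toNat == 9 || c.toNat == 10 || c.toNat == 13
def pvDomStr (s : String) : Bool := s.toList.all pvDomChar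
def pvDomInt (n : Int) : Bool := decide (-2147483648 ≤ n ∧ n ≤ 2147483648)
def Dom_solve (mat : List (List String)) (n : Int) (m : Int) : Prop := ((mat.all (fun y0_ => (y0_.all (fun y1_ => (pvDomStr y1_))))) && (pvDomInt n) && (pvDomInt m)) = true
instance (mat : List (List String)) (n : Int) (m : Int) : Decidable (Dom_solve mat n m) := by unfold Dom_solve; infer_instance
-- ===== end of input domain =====

-- B replaces A's bottom-up max-height DP grid by per-row prefix sums of tree
-- cells plus a direct expand-and-count at each root ('alternative' objective).
-- A only mutates its local dp grid, never mat; B mutates nothing.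

-- ===== PORT A =====

-- mat[i][j] / dp[i][j]; every use site has 0 ≤ i and 0 ≤ j, where pyGetD is exact
def pvCell (mat : List (List String)) (i j : Int) : String :=
  PySem.List.pyGetD (PySem.List.pyGetD mat i []) j ""

def pvGet2 (dp : List (List Int)) (i j : Int) : Int :=
  PySem.List.pyGetD (PySem.List.pyGetD dp i []) j 0

-- dp[i][j] = v; every use site has 0 ≤ i < len dp and 0 ≤ j < len dp[i], where this is exact
def pvSet2 (dp : List (List Int)) (i j : Int) (v : Int) : List (List Int) :=
  dp.modify i.toNat (fun row => row.set j.toNat v)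

def solve (mat : List (List String)) (n : Int) (m : Int) : Int :=
  -- dp = [[1 for _ in range(m)] for _ in range(n)]
  let dp0 : List (List Int) :=
    (PySem.List.pyRange 0 n 1).map (fun _ => (PySem.List.pyRange 0 m 1).map (fun _ => (1 : Int)))
  -- first double loop: dp[i][j] = 0 where mat[i][j] == '.'
  let dp1 :=
    (PySem.List.pyRange 0 n 1).foldl (fun dp i =>
      (PySem.List.pyRange 0 m 1).foldl (fun dp j =>
        if pvCell mat i j == "." then pvSet2 dp i j 0 else dp) dp) dp0
  -- second double loop: for i in range(n-2,-1,-1): for j in range(1,m-1): …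
  let dp2 :=
    (PySem.List.pyRange (n-2) (-1) (-1)).foldl (fun dp i =>
      (PySem.List.pyRange 1 (m-1) 1).foldl (fun dp j =>
        if pvGet2 dp i j == 0 then dp
        else
          let minh := min (min (pvGet2 dp (i+1) (j-1)) (pvGet2 dp (i+1) j)) (pvGet2 dp (i+1) (j+1))
          pvSet2 dp i j (1 + minh)) dp) dp1
  -- third double loop: res += dp[i][j]
  (PySem.List.pyRange 0 n 1).foldl (fun res i =>
    (PySem.List.pyRange 0 m 1).foldl (fun res j => res + pvGet2 dp2 i j) res) 0

-- ===== PORT B =====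

-- the while loop of Source B; fuel = (n-i).toNat bounds the trip count (the guard
-- forces k < n - i), so the fuel never runs out before the guard fails
def pvExpand (pref : List (List Int)) (n m i j : Int) : Nat → Int → Int
  | 0, k => k
  | fuel+1, k =>
    if i + k < n ∧ k ≤ j ∧ j + k < m ∧
       pvGet2 pref (i+k) (j+k+1) - pvGet2 pref (i+k) (j-k) = 2*k+1
    then pvExpand pref n m i j fuel (k+1) else k

def solve_alt (mat : List (List String)) (n : Int) (m : Int) : Int :=
  -- prefix sums per row: pref[i][c] = number of tree cells among mat[i][0..c-1]
  let pref : List (List Int) :=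
    (PySem.List.pyRange 0 n 1).foldl (fun pref i =>
      let rowS :=
        (PySem.List.pyRange 0 m 1).foldl (fun (rowS : List Int × Int) j =>
          let s := rowS.2 + (if pvCell mat i j == "." then 0 else 1)
          (rowS.1 ++ [s], s)) ([0], 0)
      pref ++ [rowS.1]) []
  -- expand each root, counting heights with O(1) full-row checks
  (PySem.List.pyRange 0 n 1).foldl (fun res i =>
    (PySem.List.pyRange 0 m 1).foldl (fun res j =>
      if pvCell mat i j == "." then res
      else res + pvExpand pref n m i j (n - i).toNat 1) res) 0

-- ===== PRECONDITION & SPEC =====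
-- Pre_ excludes exactly the inputs where A raises IndexError: whenever both
-- loops run (0 < n and 0 < m), mat must have at least n rows and each of the
-- first n rows at least m cells.
def Pre_solve (mat : List (List String)) (n : Int) (m : Int) : Prop :=
  0 < n → 0 < m → (n ≤ (mat.length : Int) ∧ ∀ row ∈ mat.take n.toNat, m ≤ (row.length : Int))
instance (mat : List (List String)) (n : Int) (m : Int) : Decidable (Pre_solve mat n m) := by
  unfold Pre_solve; infer_instance

def pvWitness_solve : List (List String) × Int × Int := ([[".", "*", "*"], ["*", "*", "*"]], 2, 3)

def Spec_solve (mat : List (List String)) (n : Int) (m : Int) (out : Int) : Prop := out = solve_alt mat n m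
instance (mat : List (List String)) (n : Int) (m : Int) (out : Int) : Decidable (Spec_solve mat n m out) := by unfold Spec_solve; infer_instance

-- ===== CLAIM (what is proved, stated in full; the proofs are below) =====
def Claim_equal_solve : Prop := ∀ (mat : List (List String)) (n : Int) (m : Int), Dom_solve mat n m → Pre_solve mat n m → Spec_solve mat n m (solve mat n m)

-- ===== LEMMAS AND PROOFS =====

-- mat[i][j] is a tree cell (anything but '.'; out-of-range defaults occur only outside Pre_)
def pvTree (mat : List (List String)) (i j : Nat) : Bool := !((mat.getD i []).getD j "" == ".")

-- the value A's dp grid holds at (i, j) after the backward DP loop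
def pvH (mat : List (List String)) (N M : Nat) (i j : Nat) : Int :=
  if _h : i < N then
    if pvTree mat i j then
      if 1 ≤ j ∧ j + 1 < M ∧ i + 1 < N then
        1 + min (min (pvH mat N M (i+1) (j-1)) (pvH mat N M (i+1) j)) (pvH mat N M (i+1) (j+1))
      else 1
    else 0
  else 0
termination_by N - i
decreasing_by all_goals omega

-- number of tree cells among columns 0..c-1 of row i
def pvCnt (mat : List (List String)) (i c : Nat) : Int :=
  ((List.range c).countP (fun j => pvTree mat i j) : Nat)

-- an N×M grid of Int values as A's dp list
def pvGridI (N M : Nat) (f : Nat → Nat → Int) : List (List Int) :=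
  (List.range N).map (fun i => (List.range M).map (f i))

-- "height ≥ t+1 is witnessed at level t": row i+t is all trees on [j-t, j+t], in bounds
def pvCond (mat : List (List String)) (N M : Nat) (i j t : Nat) : Prop :=
  i + t < N ∧ t ≤ j ∧ j + t < M ∧ ∀ c, j - t ≤ c → c ≤ j + t → pvTree mat (i+t) c = true

lemma pvCell_natCast (mat : List (List String)) (i j : Nat) :
    pvCell mat (i : Int) (j : Int) = (mat.getD i []).getD j "" := by
  simp [pvCell, PySem.List.pyGetD_natCast]

lemma pvGet2_grid (N M : Nat) (f : Nat → Nat → Int) (i j : Nat) (hi : i < N) (hj : j < M) :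
    pvGet2 (pvGridI N M f) (i : Int) (j : Int) = f i j := by
  simp [pvGet2, pvGridI, PySem.List.pyGetD_natCast, List.getD, hi, hj]

lemma pvSet2_grid (N M : Nat) (f : Nat → Nat → Int) (i j : Nat) (v : Int) (hi : i < N) (hj : j < M) :
    pvSet2 (pvGridI N M f) (i : Int) (j : Int) v
      = pvGridI N M (fun a b => if a = i ∧ b = j then v else f a b) := by
  apply List.ext_getElem?
  intro a
  simp only [pvSet2, pvGridI, Int.toNat_natCast, List.getElem?_modify, List.getElem?_map]
  by_cases ha : a < N
  · rw [List.getElem?_range ha]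
    by_cases hia : i = a
    · subst hia
      simp only [Option.map_some, Option.map_eq_map]
      show some ((List.map (f i) (List.range M)).set j v) = _
      apply congrArg some
      apply List.ext_getElem?
      intro b
      rw [List.getElem?_set]
      simp only [List.getElem?_map, List.length_map, List.length_range]
      by_cases hjb : j = b
      · subst hjb
        rw [if_pos rfl, if_pos hj, List.getElem?_range hj]
        simp
      · rw [if_neg hjb]
        by_cases hb : b < M
        · rw [List.getElem?_range hb]
          simp [show ¬(b = j) from fun h => hjb h.symm]
        · rw [List.getElem?_eq_none_iff.mpr (by simpa using hb)]
          simp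
    · simp only [Option.map_some, Option.map_eq_map]
      show some (if i = a then _ else _) = _
      rw [if_neg hia]
      apply congrArg some
      apply List.map_congr_left
      intro b _
      rw [if_neg (by rintro ⟨h, -⟩; exact hia h.symm)]
  · have h1 : (List.range N)[a]? = none := List.getElem?_eq_none_iff.mpr (by simpa using ha)
    rw [h1]
    simp

lemma pvGridI_congr (N M : Nat) (f g : Nat → Nat → Int)
    (h : ∀ i < N, ∀ j < M, f i j = g i j) : pvGridI N M f = pvGridI N M g := by
  simp only [pvGridI]
  apply List.map_congr_left
  intro i hi
  apply List.map_congr_left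
  intro j hj
  exact h i (List.mem_range.mp hi) j (List.mem_range.mp hj)

lemma pvH_nonneg (mat : List (List String)) (N M i j : Nat) : 0 ≤ pvH mat N M i j := by
  induction hd : N - i generalizing i j with
  | zero => rw [pvH]; split_ifs <;> omega
  | succ d ih =>
    rw [pvH]
    split_ifs with h1 h2 h3
    · have := ih (i+1) (j-1) (by omega)
      have := ih (i+1) j (by omega)
      have := ih (i+1) (j+1) (by omega)
      omega
    all_goals omega

lemma pvH_pos (mat : List (List String)) (N M i j : Nat) (hi : i < N) (ht : pvTree mat i j = true) :
    1 ≤ pvH mat N M i j := by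
  rw [pvH, dif_pos hi, if_pos ht]
  split_ifs with h
  · have := pvH_nonneg mat N M (i+1) (j-1)
    have := pvH_nonneg mat N M (i+1) j
    have := pvH_nonneg mat N M (i+1) (j+1)
    omega
  · omega

lemma pvH_eq_zero (mat : List (List String)) (N M i j : Nat) (ht : pvTree mat i j = false) :
    pvH mat N M i j = 0 := by
  rw [pvH]; split_ifs with h1 h2 <;> simp_all

lemma pvH_le (mat : List (List String)) (N M i j : Nat) (hiN : i ≤ N) : pvH mat N M i j ≤ (N : Int) - i := by
  induction hd : N - i generalizing i j with
  | zero => rw [pvH]; split_ifs <;> omega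
  | succ d ih =>
    rw [pvH]
    split_ifs with h1 h2 h3
    · have := ih (i+1) j (by omega) (by omega)
      have hmin : min (min (pvH mat N M (i+1) (j-1)) (pvH mat N M (i+1) j)) (pvH mat N M (i+1) (j+1)) ≤ pvH mat N M (i+1) j := by
        exact le_trans (min_le_left _ _) (min_le_right _ _)
      omega
    all_goals omega

lemma pvCond_succ (mat : List (List String)) (N M : Nat) (i j s : Nat)
    (hs : 1 ≤ s) (hj : 1 ≤ j) :
    pvCond mat N M i j (s+1) ↔
      pvCond mat N M (i+1) (j-1) s ∧ pvCond mat N M (i+1) j s ∧ pvCond mat N M (i+1) (j+1) s := by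
  unfold pvCond
  constructor
  · rintro ⟨h1, h2, h3, h4⟩
    refine ⟨⟨by omega, by omega, by omega, ?_⟩, ⟨by omega, by omega, by omega, ?_⟩, ⟨by omega, by omega, by omega, ?_⟩⟩
    · intro c hc1 hc2
      have := h4 c (by omega) (by omega)
      rwa [show i + (s+1) = i + 1 + s by omega] at this
    · intro c hc1 hc2
      have := h4 c (by omega) (by omega)
      rwa [show i + (s+1) = i + 1 + s by omega] at this
    · intro c hc1 hc2
      have := h4 c (by omega) (by omega)
      rwa [show i + (s+1) = i + 1 + s by omega] at this
  · rintro ⟨⟨a1, a2, a3, a4⟩, ⟨b1, b2, b3, b4⟩, ⟨c1, c2, c3, c4⟩⟩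
    refine ⟨by omega, by omega, by omega, ?_⟩
    intro c hc1 hc2
    by_cases hcase : c ≤ j - 1 + s
    · have := a4 c (by omega) (by omega)
      rwa [show i + 1 + s = i + (s+1) by omega] at this
    · have := c4 c (by omega) (by omega)
      rwa [show i + 1 + s = i + (s+1) by omega] at this

-- the crux: dp height ≥ h iff every level t < h is witnessed
lemma pvH_ge_iff (mat : List (List String)) (N M : Nat) :
    ∀ (h i j : Nat), i < N → j < M → pvTree mat i j = true →
      ((h : Int) ≤ pvH mat N M i j ↔ ∀ t, 1 ≤ t → t < h → pvCond mat N M i j t) := by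
  intro h
  induction h with
  | zero =>
    intro i j hi hj ht
    constructor
    · intro _ t ht1 ht0; omega
    · intro _; exact_mod_cast pvH_nonneg mat N M i j
  | succ h ih =>
    intro i j hi hj ht
    rcases Nat.eq_zero_or_pos h with hh0 | hh1
    · subst hh0
      constructor
      · intro _ t ht1 ht0; omega
      · intro _; exact_mod_cast pvH_pos mat N M i j hi ht
    -- h ≥ 1, so h+1 ≥ 2
    · rw [pvH, dif_pos hi, if_pos ht]
      by_cases hint : 1 ≤ j ∧ j + 1 < M ∧ i + 1 < N
      · rw [if_pos hint]
        obtain ⟨hj1, hjM, hiN⟩ := hint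
        have key : ∀ j' , j' < M → ((h:Int) ≤ pvH mat N M (i+1) j' ↔
            pvTree mat (i+1) j' = true ∧ ∀ s, 1 ≤ s → s < h → pvCond mat N M (i+1) j' s) := by
          intro j' hj'
          constructor
          · intro hle
            have htr : pvTree mat (i+1) j' = true := by
              by_contra hf
              have := pvH_eq_zero mat N M (i+1) j' (by simpa using hf)
              omega
            exact ⟨htr, (ih (i+1) j' hiN hj' htr).mp hle⟩
          · rintro ⟨htr, hconds⟩
            exact (ih (i+1) j' hiN hj' htr).mpr hconds
        rw [show (1:Int) + min (min (pvH mat N M (i+1) (j-1)) (pvH mat N M (i+1) j)) (pvH mat N M (i+1) (j+1)) =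
              min (min (pvH mat N M (i+1) (j-1)) (pvH mat N M (i+1) j)) (pvH mat N M (i+1) (j+1)) + 1 by ring]
        rw [show ((h+1 : Nat) : Int) = (h:Int) + 1 by push_cast; ring]
        rw [Int.add_le_add_iff_right, le_min_iff, le_min_iff]
        rw [key (j-1) (by omega), key j hj, key (j+1) (by omega)]
        constructor
        · rintro ⟨⟨⟨ta, ca⟩, ⟨tb, cb⟩⟩, ⟨tc, cc⟩⟩
          intro t ht1 htlt
          rcases Nat.exists_eq_add_of_le ht1 with ⟨s, hs⟩
          rcases Nat.eq_zero_or_pos s with hs0 | hs1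
          · -- t = 1
            subst hs0
            obtain rfl : t = 1 := by omega
            refine ⟨by omega, by omega, by omega, ?_⟩
            intro c hc1 hc2
            rcases (by omega : c = j - 1 ∨ c = j ∨ c = j + 1) with rfl | rfl | rfl
            · simpa using ta
            · simpa using tb
            · simpa using tc
          · -- t = s + 1, 1 ≤ s ≤ h - 1
            rw [show t = s + 1 by omega, pvCond_succ mat N M i j s hs1 hj1]
            exact ⟨ca s hs1 (by omega), cb s hs1 (by omega), cc s hs1 (by omega)⟩
        · intro hall
          have h1 := hall 1 (by omega) (by omega)
          obtain ⟨-, -, -, hrow⟩ := h1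
          have ta : pvTree mat (i+1) (j-1) = true := by
            have := hrow (j-1) (by omega) (by omega); simpa using this
          have tb : pvTree mat (i+1) j = true := by
            have := hrow j (by omega) (by omega); simpa using this
          have tc : pvTree mat (i+1) (j+1) = true := by
            have := hrow (j+1) (by omega) (by omega); simpa using this
          have hsucc : ∀ s, 1 ≤ s → s < h →
              pvCond mat N M (i+1) (j-1) s ∧ pvCond mat N M (i+1) j s ∧ pvCond mat N M (i+1) (j+1) s := by
            intro s hs1 hsh
            exact (pvCond_succ mat N M i j s hs1 hj1).mp (hall (s+1) (by omega) (by omega))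
          exact ⟨⟨⟨ta, fun s a b => (hsucc s a b).1⟩, ⟨tb, fun s a b => (hsucc s a b).2.1⟩⟩,
                 ⟨tc, fun s a b => (hsucc s a b).2.2⟩⟩
      · rw [if_neg hint]
        constructor
        · intro hle
          exfalso
          have : ((h:Int) + 1) ≤ 1 := by push_cast at hle ⊢; omega
          omega
        · intro hall
          exfalso
          have h1 := hall 1 (by omega) (by omega)
          obtain ⟨b1, b2, b3, -⟩ := h1
          exact hint ⟨by omega, by omega, by omega⟩


-- A's dp value right after the first double loop
def pvBase (mat : List (List String)) (i j : Nat) : Int := if pvTree mat i j then 1 else 0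

lemma pvH_edge (mat : List (List String)) (N M i j : Nat) (hi : i < N)
    (hedge : ¬(1 ≤ j ∧ j + 1 < M ∧ i + 1 < N)) : pvH mat N M i j = pvBase mat i j := by
  rw [pvH, dif_pos hi, if_neg hedge, pvBase]

lemma pvRange_zero_cast (z : Int) :
    PySem.List.pyRange 0 z 1 = (List.range z.toNat).map (Nat.cast : Nat → Int) := by
  rw [PySem.List.pyRange_one]
  simp only [Int.sub_zero, zero_add]

lemma pvCell_dot_iff (mat : List (List String)) (i j : Nat) :
    (pvCell mat (i : Int) (j : Int) == ".") = !pvTree mat i j := by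
  rw [pvCell_natCast, pvTree, Bool.not_not]

-- first double loop, one row
lemma pvLoop1_inner (mat : List (List String)) (N M : Nat) (i : Nat) (hi : i < N) :
    ∀ (t : Nat), t ≤ M → ∀ (f : Nat → Nat → Int),
      ((List.range t).map (Nat.cast : Nat → Int)).foldl
          (fun dp j => if pvCell mat (i : Int) j == "." then pvSet2 dp (i : Int) j 0 else dp)
          (pvGridI N M f)
        = pvGridI N M (fun a b => if a = i ∧ b < t ∧ pvTree mat a b = false then 0 else f a b) := by
  intro t
  induction t with
  | zero =>
    intro _ f
    simp only [List.range_zero, List.map_nil, List.foldl_nil]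
    apply pvGridI_congr
    intro a _ b _
    rw [if_neg (by rintro ⟨-, h, -⟩; omega)]
  | succ t ih =>
    intro htM f
    rw [List.range_succ, List.map_append, List.foldl_append, ih (by omega) f]
    simp only [List.map_cons, List.map_nil, List.foldl_cons, List.foldl_nil]
    rw [pvCell_dot_iff]
    by_cases htr : pvTree mat i t = true
    · rw [htr]
      simp only [Bool.not_true, Bool.false_eq_true, if_false]
      apply pvGridI_congr
      intro a _ b _
      by_cases hc : a = i ∧ b < t ∧ pvTree mat a b = false
      · rw [if_pos hc, if_pos ⟨hc.1, by omega, hc.2.2⟩]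
      · rw [if_neg hc, if_neg (by rintro ⟨h1, h2, h3⟩; exact hc ⟨h1, by
          rcases Nat.lt_succ_iff_lt_or_eq.mp h2 with h | h
          · omega
          · exfalso; subst h; subst h1; simp [htr] at h3, h3⟩)]
    · have htr' : pvTree mat i t = false := by simpa using htr
      rw [htr']
      simp only [Bool.not_false, if_true]
      rw [pvSet2_grid N M _ i t 0 hi (by omega)]
      apply pvGridI_congr
      intro a _ b _
      by_cases hc : a = i ∧ b = t
      · rw [if_pos hc, if_pos ⟨hc.1, by omega, by rw [hc.1, hc.2]; exact htr'⟩]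
      · rw [if_neg hc]
        by_cases hc2 : a = i ∧ b < t ∧ pvTree mat a b = false
        · rw [if_pos hc2, if_pos ⟨hc2.1, by omega, hc2.2.2⟩]
        · rw [if_neg hc2, if_neg (by rintro ⟨h1, h2, h3⟩; exact hc2 ⟨h1, by
            rcases Nat.lt_succ_iff_lt_or_eq.mp h2 with h | h
            · omega
            · exact absurd ⟨h1, h⟩ hc, h3⟩)]

-- first double loop, all rows
lemma pvLoop1 (mat : List (List String)) (N M : Nat) :
    ∀ (t : Nat), t ≤ N →
      ((List.range t).map (Nat.cast : Nat → Int)).foldl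
          (fun dp i => ((List.range M).map (Nat.cast : Nat → Int)).foldl
            (fun dp j => if pvCell mat i j == "." then pvSet2 dp i j 0 else dp) dp)
          (pvGridI N M (fun _ _ => 1))
        = pvGridI N M (fun a b => if a < t then pvBase mat a b else 1) := by
  intro t
  induction t with
  | zero =>
    simp only [List.range_zero, List.map_nil, List.foldl_nil]
    intro _
    apply pvGridI_congr
    intro a _ b _
    rw [if_neg (by omega)]
  | succ t ih =>
    intro htN
    rw [List.range_succ, List.map_append, List.foldl_append, ih (by omega)]
    simp only [List.map_cons, List.map_nil, List.foldl_cons, List.foldl_nil]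
    rw [pvLoop1_inner mat N M t (by omega) M (le_refl M)]
    apply pvGridI_congr
    intro a ha b hb
    by_cases hc : a = t
    · subst hc
      by_cases htr : pvTree mat a b = false
      · rw [if_pos ⟨rfl, hb, htr⟩, if_pos (by omega), pvBase, htr]
        simp
      · rw [if_neg (by rintro ⟨-, -, h⟩; exact htr h), if_neg (by omega), if_pos (by omega),
          pvBase, (by simpa using htr : pvTree mat a b = true)]
        simp
    · rw [if_neg (by rintro ⟨h, -, -⟩; exact hc h)]
      by_cases h2 : a < t
      · rw [if_pos h2, if_pos (by omega)]
      · rw [if_neg h2, if_neg (by omega)]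


-- second double loop, one row: updates columns 1..m-2 of row i to the dp heights
lemma pvLoop2_inner (mat : List (List String)) (N M : Nat) (i : Nat) (hi : i < N) (hiN : i + 1 < N)
    (G : Nat → Nat → Int)
    (hG1 : ∀ b < M, G (i+1) b = pvH mat N M (i+1) b)
    (hG0 : ∀ b < M, G i b = pvBase mat i b) :
    ∀ (t : Nat), t ≤ M - 2 →
      ((List.range t).map (fun k => (1 : Int) + (k : Nat))).foldl
          (fun dp j => if pvGet2 dp (i : Int) j == 0 then dp
            else pvSet2 dp (i : Int) j
              (1 + min (min (pvGet2 dp ((i : Int)+1) (j-1)) (pvGet2 dp ((i : Int)+1) j)) (pvGet2 dp ((i : Int)+1) (j+1))))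
          (pvGridI N M G)
        = pvGridI N M (fun a b => if a = i ∧ 1 ≤ b ∧ b < 1 + t then pvH mat N M a b else G a b) := by
  intro t
  induction t with
  | zero =>
    intro _
    simp only [List.range_zero, List.map_nil, List.foldl_nil]
    apply pvGridI_congr
    intro a _ b _
    rw [if_neg (by rintro ⟨-, h1, h2⟩; omega)]
  | succ t ih =>
    intro htM
    have hM2 : t + 2 < M := by omega
    rw [List.range_succ, List.map_append, List.foldl_append, ih (by omega)]
    simp only [List.map_cons, List.map_nil, List.foldl_cons, List.foldl_nil]
    have hc1 : (1 : Int) + (t : Nat) = ((t+1 : Nat) : Int) := by omega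
    have hc2 : (1 : Int) + (t : Nat) - 1 = ((t : Nat) : Int) := by omega
    have hc3 : (1 : Int) + (t : Nat) + 1 = ((t+2 : Nat) : Int) := by omega
    have hc4 : ((i : Nat) : Int) + 1 = ((i+1 : Nat) : Int) := by omega
    rw [hc2, hc3, hc1, hc4]
    rw [pvGet2_grid N M _ i (t+1) hi (by omega)]
    have hval : (if i = i ∧ 1 ≤ t + 1 ∧ t + 1 < 1 + t then pvH mat N M i (t+1) else G i (t+1))
        = pvBase mat i (t+1) := by
      rw [if_neg (by rintro ⟨-, -, h⟩; omega)]
      exact hG0 (t+1) (by omega)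
    rw [hval]
    by_cases htr : pvTree mat i (t+1) = true
    · have hb1 : pvBase mat i (t+1) = 1 := by rw [pvBase, if_pos htr]
      rw [hb1, show ((1:Int) == 0) = false by decide]
      simp only [Bool.false_eq_true, if_false]
      rw [pvGet2_grid N M _ (i+1) t (by omega) (by omega),
          pvGet2_grid N M _ (i+1) (t+1) (by omega) (by omega),
          pvGet2_grid N M _ (i+1) (t+2) (by omega) (by omega)]
      rw [if_neg (by rintro ⟨h, -⟩; omega), if_neg (by rintro ⟨h, -⟩; omega),
          if_neg (by rintro ⟨h, -⟩; omega)]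
      rw [hG1 t (by omega), hG1 (t+1) (by omega), hG1 (t+2) (by omega)]
      have hHval : (1 : Int) + min (min (pvH mat N M (i+1) t) (pvH mat N M (i+1) (t+1))) (pvH mat N M (i+1) (t+2))
          = pvH mat N M i (t+1) := by
        conv_rhs => rw [pvH]
        rw [dif_pos hi, if_pos htr, if_pos ⟨by omega, by omega, hiN⟩]
        norm_num
      rw [pvSet2_grid N M _ i (t+1) _ hi (by omega)]
      apply pvGridI_congr
      intro a _ b _
      by_cases hab : a = i ∧ b = t + 1
      · rw [if_pos hab, hab.1, hab.2, if_pos ⟨rfl, by omega, by omega⟩, ← hHval]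
      · rw [if_neg hab]
        by_cases hab2 : a = i ∧ 1 ≤ b ∧ b < 1 + t
        · rw [if_pos hab2, if_pos ⟨hab2.1, hab2.2.1, by omega⟩]
        · rw [if_neg hab2, if_neg (by
            rintro ⟨rfl, h1, h2⟩
            rcases (by omega : b < 1 + t ∨ b = t + 1) with h | h
            · exact hab2 ⟨rfl, h1, h⟩
            · exact hab ⟨rfl, h⟩)]
    · have htr' : pvTree mat i (t+1) = false := by simpa using htr
      have hb0 : pvBase mat i (t+1) = 0 := by rw [pvBase, htr']; simp
      rw [hb0, show ((0:Int) == 0) = true by decide]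
      simp only [if_true]
      apply pvGridI_congr
      intro a _ b _
      by_cases hab : a = i ∧ b = t + 1
      · rw [if_neg (by rintro ⟨-, -, h⟩; omega), if_pos ⟨hab.1, by omega, by omega⟩,
            hab.1, hab.2, pvH_eq_zero mat N M i (t+1) htr', hG0 (t+1) (by omega), hb0]
      · by_cases hab2 : a = i ∧ 1 ≤ b ∧ b < 1 + t
        · rw [if_pos hab2, if_pos ⟨hab2.1, hab2.2.1, by omega⟩]
        · rw [if_neg hab2, if_neg (by
            rintro ⟨rfl, h1, h2⟩
            rcases (by omega : b < 1 + t ∨ b = t + 1) with h | h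
            · exact hab2 ⟨rfl, h1, h⟩
            · exact hab ⟨rfl, h⟩)]

-- second double loop, all rows (processed bottom-up)
lemma pvLoop2 (mat : List (List String)) (N M : Nat) (m : Int) (hm : m.toNat = M) :
    ∀ (t : Nat), t ≤ N - 1 →
      ((List.range t).map (Nat.cast : Nat → Int)).foldr
          (fun x dp => (PySem.List.pyRange 1 (m-1) 1).foldl
            (fun dp j => if pvGet2 dp x j == 0 then dp
              else pvSet2 dp x j
                (1 + min (min (pvGet2 dp (x+1) (j-1)) (pvGet2 dp (x+1) j)) (pvGet2 dp (x+1) (j+1)))) dp)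
          (pvGridI N M (fun a b => if t ≤ a then pvH mat N M a b else pvBase mat a b))
        = pvGridI N M (pvH mat N M) := by
  intro t
  induction t with
  | zero =>
    intro _
    simp only [List.range_zero, List.map_nil, List.foldr_nil]
    apply pvGridI_congr
    intro a _ b _
    rw [if_pos (by omega)]
  | succ t ih =>
    intro htN
    rw [List.range_succ, List.map_append, List.foldr_append]
    simp only [List.map_cons, List.map_nil, List.foldr_cons, List.foldr_nil]
    have hrange : PySem.List.pyRange 1 (m-1) 1
        = (List.range (M-2)).map (fun k => (1 : Int) + (k : Nat)) := by
      rw [PySem.List.pyRange_one, show (m - 1 - 1).toNat = M - 2 by omega]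
    rw [hrange]
    rw [pvLoop2_inner mat N M t (by omega) (by omega)
          (fun a b => if t + 1 ≤ a then pvH mat N M a b else pvBase mat a b)
          (fun b _ => if_pos (by omega))
          (fun b _ => if_neg (by omega))
          (M-2) (le_refl _)]
    have hmid : pvGridI N M (fun a b => if a = t ∧ 1 ≤ b ∧ b < 1 + (M-2) then pvH mat N M a b
          else if t + 1 ≤ a then pvH mat N M a b else pvBase mat a b)
        = pvGridI N M (fun a b => if t ≤ a then pvH mat N M a b else pvBase mat a b) := by
      apply pvGridI_congr
      intro a ha b hb
      by_cases hat : a = t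
      · subst hat
        by_cases hbmid : 1 ≤ b ∧ b < 1 + (M-2)
        · rw [if_pos ⟨rfl, hbmid.1, hbmid.2⟩, if_pos (by omega)]
        · rw [if_neg (by rintro ⟨-, h1, h2⟩; exact hbmid ⟨h1, h2⟩), if_neg (by omega),
              if_pos (by omega)]
          exact (pvH_edge mat N M a b ha (by omega)).symm
      · rw [if_neg (by rintro ⟨h, -⟩; exact hat h)]
        by_cases h2 : t + 1 ≤ a
        · rw [if_pos h2, if_pos (by omega)]
        · rw [if_neg h2, if_neg (by omega)]
    rw [hmid, ← hrange]
    exact ih (by omega)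

-- prefix counts: one more column
lemma pvCnt_succ (mat : List (List String)) (i t : Nat) :
    pvCnt mat i (t+1) = pvCnt mat i t + (if pvTree mat i t then 1 else 0) := by
  unfold pvCnt
  rw [List.range_succ, List.countP_append]
  simp only [List.countP_cons, List.countP_nil]
  by_cases h : pvTree mat i t = true
  · rw [h]; push_cast; simp
  · rw [(by simpa using h : pvTree mat i t = false)]; push_cast; simp

-- the prefix-sum window equals its width iff the whole window is trees
lemma pvCntFull (mat : List (List String)) (r a b : Nat) (hab : a ≤ b + 1) :
    (pvCnt mat r (b+1) - pvCnt mat r a = ((b+1 : Nat) : Int) - (a : Nat)) ↔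
      (∀ c, a ≤ c → c ≤ b → pvTree mat r c = true) := by
  unfold pvCnt
  rw [show b + 1 = a + (b + 1 - a) by omega, List.range_add, List.countP_append]
  have hlen : (List.countP (fun j => pvTree mat r j) ((List.range (b+1-a)).map (fun x => a + x)))
      ≤ b + 1 - a := by
    calc _ ≤ ((List.range (b+1-a)).map (fun x => a + x)).length := List.countP_le_length
    _ = b + 1 - a := by simp
  constructor
  · intro h c hc1 hc2
    have hcnt : List.countP (fun j => pvTree mat r j) ((List.range (b+1-a)).map (fun x => a + x))
        = b + 1 - a := by omega
    have hall := List.countP_eq_length.mp (by rw [hcnt]; simp)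
    have := hall (c : Nat) (by
      refine List.mem_map.mpr ⟨c - a, ?_, by omega⟩
      rw [List.mem_range]; omega)
    simpa using this
  · intro h
    have hcnt : List.countP (fun j => pvTree mat r j) ((List.range (b+1-a)).map (fun x => a + x))
        = ((List.range (b+1-a)).map (fun x => a + x)).length := by
      rw [List.countP_eq_length]
      intro x hx
      rcases List.mem_map.mp hx with ⟨k, hk, rfl⟩
      exact h (a+k) (by omega) (by rw [List.mem_range] at hk; omega)
    rw [hcnt]
    simp only [List.length_map, List.length_range]
    push_cast [show a + (b+1-a) - a = b + 1 - a by omega]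
    omega


-- building one prefix row (B's inner loop)
lemma pvPrefInner (mat : List (List String)) (i : Nat) :
    ∀ (t : Nat),
      ((List.range t).map (Nat.cast : Nat → Int)).foldl
          (fun (rowS : List Int × Int) j =>
            (rowS.1 ++ [rowS.2 + (if pvCell mat (i : Int) j == "." then 0 else 1)],
             rowS.2 + (if pvCell mat (i : Int) j == "." then 0 else 1)))
          ([0], 0)
        = ((List.range (t+1)).map (pvCnt mat i), pvCnt mat i t) := by
  intro t
  induction t with
  | zero => simp [pvCnt]
  | succ t ih =>
    rw [List.range_succ, List.map_append, List.foldl_append, ih]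
    simp only [List.map_cons, List.map_nil, List.foldl_cons, List.foldl_nil]
    rw [pvCell_dot_iff]
    have hs : pvCnt mat i t + (if (!pvTree mat i t) = true then 0 else 1) = pvCnt mat i (t+1) := by
      rw [pvCnt_succ]
      by_cases h : pvTree mat i t = true
      · rw [h]; norm_num
      · rw [(by simpa using h : pvTree mat i t = false)]; norm_num
    rw [hs, show (List.range (t+1)).map (pvCnt mat i) ++ [pvCnt mat i (t+1)]
          = (List.range (t+1+1)).map (pvCnt mat i) by
        rw [show List.range (t+1+1) = List.range (t+1) ++ [t+1] from List.range_succ, List.map_append]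
        rfl]

-- the whole prefix table (B's first loop) is the grid of pvCnt
lemma pvPref (mat : List (List String)) (N M : Nat) (n m : Int) (hn : n.toNat = N) (hm : m.toNat = M) :
    (PySem.List.pyRange 0 n 1).foldl (fun pref i =>
        pref ++ [((PySem.List.pyRange 0 m 1).foldl
          (fun (rowS : List Int × Int) j =>
            (rowS.1 ++ [rowS.2 + (if pvCell mat i j == "." then 0 else 1)],
             rowS.2 + (if pvCell mat i j == "." then 0 else 1)))
          ([0], 0)).1]) []
      = pvGridI N (M+1) (pvCnt mat) := by
  rw [pvRange_zero_cast n, pvRange_zero_cast m, hn, hm,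
      PySem.List.foldl_append_singleton_eq_map, List.nil_append, List.map_map]
  apply List.map_congr_left
  intro x _
  show ((((List.range M).map (Nat.cast : Nat → Int)).foldl _ ([0], 0)).1 : List Int) = _
  rw [pvPrefInner mat x M]

-- B's while loop computes the dp height at a tree cell
lemma pvExpand_eq (mat : List (List String)) (N M : Nat) (i j : Nat)
    (hi : i < N) (hj : j < M) (ht : pvTree mat i j = true) :
    ∀ (fuel k : Nat), 1 ≤ k → (k : Int) ≤ pvH mat N M i j →
      (pvH mat N M i j).toNat ≤ k + fuel →
      pvExpand (pvGridI N (M+1) (pvCnt mat)) (N : Int) (M : Int) (i : Int) (j : Int) fuel (k : Int)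
        = pvH mat N M i j := by
  intro fuel
  induction fuel with
  | zero =>
    intro k _ hk2 hk3
    have h0 := pvH_nonneg mat N M i j
    have : (k : Int) = pvH mat N M i j := by omega
    rw [pvExpand, this]
  | succ fuel ih =>
    intro k hk1 hk2 hk3
    rw [pvExpand]
    have hiff : ((i : Int) + k < N ∧ (k : Int) ≤ j ∧ (j : Int) + k < M ∧
        pvGet2 (pvGridI N (M+1) (pvCnt mat)) ((i:Int)+k) ((j:Int)+k+1)
          - pvGet2 (pvGridI N (M+1) (pvCnt mat)) ((i:Int)+k) ((j:Int)-k) = 2*(k:Int)+1)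
        ↔ pvCond mat N M i j k := by
      constructor
      · rintro ⟨c1, c2, c3, c4⟩
        have hik : i + k < N := by omega
        have hkj : k ≤ j := by omega
        have hjk : j + k < M := by omega
        rw [show (i:Int) + k = ((i+k : Nat) : Int) by push_cast; ring,
            show (j:Int) + k + 1 = ((j+k+1 : Nat) : Int) by push_cast; ring,
            show (j:Int) - k = ((j-k : Nat) : Int) from (by rw [Nat.cast_sub hkj]),
            pvGet2_grid N (M+1) (pvCnt mat) (i+k) (j+k+1) hik (by omega),
            pvGet2_grid N (M+1) (pvCnt mat) (i+k) (j-k) hik (by omega)] at c4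
        refine ⟨hik, hkj, hjk, ?_⟩
        exact (pvCntFull mat (i+k) (j-k) (j+k) (by omega)).mp (by
          rw [c4]; push_cast [Nat.cast_sub hkj]; ring)
      · rintro ⟨hik, hkj, hjk, hfull⟩
        refine ⟨by omega, by omega, by omega, ?_⟩
        rw [show (i:Int) + k = ((i+k : Nat) : Int) by push_cast; ring,
            show (j:Int) + k + 1 = ((j+k+1 : Nat) : Int) by push_cast; ring,
            show (j:Int) - k = ((j-k : Nat) : Int) from (by rw [Nat.cast_sub hkj]),
            pvGet2_grid N (M+1) (pvCnt mat) (i+k) (j+k+1) hik (by omega),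
            pvGet2_grid N (M+1) (pvCnt mat) (i+k) (j-k) hik (by omega),
            (pvCntFull mat (i+k) (j-k) (j+k) (by omega)).mpr hfull]
        push_cast [Nat.cast_sub hkj]; ring
    by_cases hC : (i : Int) + k < N ∧ (k : Int) ≤ j ∧ (j : Int) + k < M ∧
        pvGet2 (pvGridI N (M+1) (pvCnt mat)) ((i:Int)+k) ((j:Int)+k+1)
          - pvGet2 (pvGridI N (M+1) (pvCnt mat)) ((i:Int)+k) ((j:Int)-k) = 2*(k:Int)+1
    · rw [if_pos hC]
      have hcond := hiff.mp hC
      have hprev := (pvH_ge_iff mat N M k i j hi hj ht).mp hk2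
      have hstep : ((k+1 : Nat) : Int) ≤ pvH mat N M i j := by
        apply (pvH_ge_iff mat N M (k+1) i j hi hj ht).mpr
        intro t ht1 htk
        rcases (by omega : t < k ∨ t = k) with h | rfl
        · exact hprev t ht1 h
        · exact hcond
      rw [show (k : Int) + 1 = ((k+1 : Nat) : Int) by push_cast; ring]
      exact ih (k+1) (by omega) hstep (by omega)
    · rw [if_neg hC]
      have hlt : ¬ ((k+1 : Nat) : Int) ≤ pvH mat N M i j := by
        intro hge
        exact hC (hiff.mpr ((pvH_ge_iff mat N M (k+1) i j hi hj ht).mp hge k hk1 (by omega)))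
      have : (k : Int) = pvH mat N M i j := by push_cast at hlt; omega
      exact this

-- A's final summation loop over the dp grid
lemma pvSumGrid (H : Nat → Nat → Int) (N M : Nat) :
    ((List.range N).map (Nat.cast : Nat → Int)).foldl
        (fun res i => ((List.range M).map (Nat.cast : Nat → Int)).foldl
          (fun res j => res + pvGet2 (pvGridI N M H) i j) res) 0
      = ((List.range N).map (fun i => ((List.range M).map (fun j => H i j)).sum)).sum := by
  rw [List.foldl_map]
  have hrow : ∀ (acc : Int), ∀ x ∈ List.range N,
      ((List.range M).map (Nat.cast : Nat → Int)).foldl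
          (fun res j => res + pvGet2 (pvGridI N M H) (x : Nat) j) acc
        = acc + ((List.range M).map (fun j => H x j)).sum := by
    intro acc x hx
    rw [List.foldl_map]
    rw [PySem.List.foldl_congr_mem (List.range M) _
        (fun res y => res + H x y) acc (by
          intro acc' y hy
          rw [pvGet2_grid N M H x y (List.mem_range.mp hx) (List.mem_range.mp hy)])]
    exact PySem.List.foldl_add (List.range M) (fun y => H x y) acc
  rw [PySem.List.foldl_congr_mem (List.range N) _
      (fun acc x => acc + ((List.range M).map (fun j => H x j)).sum) 0 hrow]
  rw [PySem.List.foldl_add (List.range N) _ 0]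
  ring


-- B's summation loop: each root contributes its dp height
lemma pvSumExpand (mat : List (List String)) (n m : Int) :
    ((List.range n.toNat).map (Nat.cast : Nat → Int)).foldl
        (fun res i => ((List.range m.toNat).map (Nat.cast : Nat → Int)).foldl
          (fun res j => if pvCell mat i j == "." then res
            else res + pvExpand (pvGridI n.toNat (m.toNat+1) (pvCnt mat)) n m i j (n - i).toNat 1) res) 0
      = ((List.range n.toNat).map (fun i => ((List.range m.toNat).map
          (fun j => if pvTree mat i j = true then pvH mat n.toNat m.toNat i j else 0)).sum)).sum := by
  rw [List.foldl_map]
  have hrow : ∀ (acc : Int), ∀ x ∈ List.range n.toNat,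
      ((List.range m.toNat).map (Nat.cast : Nat → Int)).foldl
          (fun res j => if pvCell mat (x : Nat) j == "." then res
            else res + pvExpand (pvGridI n.toNat (m.toNat+1) (pvCnt mat)) n m (x : Nat) j (n - (x : Nat)).toNat 1) acc
        = acc + ((List.range m.toNat).map
            (fun j => if pvTree mat x j = true then pvH mat n.toNat m.toNat x j else 0)).sum := by
    intro acc x hx
    rw [List.foldl_map]
    rw [PySem.List.foldl_congr_mem (List.range m.toNat) _
        (fun res y => res + (if pvTree mat x y = true then pvH mat n.toNat m.toNat x y else 0)) acc (by
          intro acc' y hy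
          have hxN := List.mem_range.mp hx
          have hyM := List.mem_range.mp hy
          rw [pvCell_dot_iff]
          by_cases htr : pvTree mat x y = true
          · rw [htr]
            simp only [Bool.not_true, Bool.false_eq_true, if_false, if_pos htr]
            have hnN : n = ((n.toNat : Nat) : Int) := by omega
            have hmM : m = ((m.toNat : Nat) : Int) := by omega
            have hfuel : (n - (x : Nat)).toNat = n.toNat - x := by omega
            have hres := pvExpand_eq mat n.toNat m.toNat x y hxN hyM htr (n.toNat - x) 1
              (le_refl 1)
              (by exact_mod_cast pvH_pos mat n.toNat m.toNat x y hxN htr)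
              (by
                have h1 := pvH_le mat n.toNat m.toNat x y (by omega)
                have h2 := pvH_nonneg mat n.toNat m.toNat x y
                omega)
            rw [Nat.cast_one, ← hnN, ← hmM] at hres
            rw [hfuel, hres]
          · have htr' : pvTree mat x y = false := by simpa using htr
            simp [htr'])]
    exact PySem.List.foldl_add (List.range m.toNat) _ acc
  rw [PySem.List.foldl_congr_mem (List.range n.toNat) _
      (fun acc x => acc + ((List.range m.toNat).map
        (fun j => if pvTree mat x j = true then pvH mat n.toNat m.toNat x j else 0)).sum) 0 hrow]
  rw [PySem.List.foldl_add (List.range n.toNat) _ 0]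
  ring

-- ===== VERDICT (by name: the statement is the Claim_ definition above) =====
theorem solve_spec : Claim_equal_solve := by
  intro mat n m _ _
  unfold Spec_solve
  simp only [solve, solve_alt]
  rw [pvPref mat n.toNat m.toNat n m rfl rfl]
  rw [pvRange_zero_cast n, pvRange_zero_cast m]
  rw [show ((List.range n.toNat).map (Nat.cast : Nat → Int)).map
        (fun _ => ((List.range m.toNat).map (Nat.cast : Nat → Int)).map (fun _ => (1:Int)))
      = pvGridI n.toNat m.toNat (fun _ _ => 1) by
    simp only [List.map_map]; rfl]
  rw [pvLoop1 mat n.toNat m.toNat n.toNat (le_refl _)]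
  rw [show pvGridI n.toNat m.toNat (fun a b => if a < n.toNat then pvBase mat a b else 1)
      = pvGridI n.toNat m.toNat (fun a b => if n.toNat - 1 ≤ a then pvH mat n.toNat m.toNat a b else pvBase mat a b) from
    pvGridI_congr _ _ _ _ (fun a ha b hb => by
      rw [if_pos ha]
      by_cases h : n.toNat - 1 ≤ a
      · rw [if_pos h, pvH_edge mat n.toNat m.toNat a b ha (by rintro ⟨-, -, hlt⟩; omega)]
      · rw [if_neg h])]
  rw [show PySem.List.pyRange (n-2) (-1) (-1)
      = ((List.range (n.toNat - 1)).map (Nat.cast : Nat → Int)).reverse by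
    rw [PySem.List.pyRange_neg_one_eq_reverse, show (-1:Int)+1 = 0 by ring,
        show (n-2:Int)+1 = n-1 by ring, pvRange_zero_cast (n-1),
        show (n-1).toNat = n.toNat - 1 by omega]]
  rw [List.foldl_reverse]
  rw [pvLoop2 mat n.toNat m.toNat m rfl (n.toNat - 1) (le_refl _)]
  rw [pvSumGrid (pvH mat n.toNat m.toNat) n.toNat m.toNat]
  rw [pvSumExpand mat n m]
  apply congrArg List.sum
  apply List.map_congr_left
  intro x _
  apply congrArg List.sum
  apply List.map_congr_left
  intro y _
  by_cases htr : pvTree mat x y = true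
  · rw [if_pos htr]
  · rw [if_neg htr, pvH_eq_zero mat n.toNat m.toNat x y (by simpa using htr)]
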